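-- pv_equiv track=rewrite | github.com/luciansmith/kuhner-python | viewVAFclusters.py | sortLabels
-- ===== SOURCE A (Python) =====
-- def sortLabels(labels):
--     newlist = []
--     sublist = []
--     for label in labels:
--         if len(label.split(", '"))==1:
--             sublist.append(label)
--     sublist.sort()
--     newlist.extend(sublist)
--     for n in range(9,1,-1):
--         for dels in range(0, 9):
--             sublist = []
--             for label in labels:
--                 delcount = label.count("-")
--                 if len(label.split(", '"))==n and delcount == dels:
--                     sublist.append(label)
--             sublist.sort()
--             newlist.extend(sublist)
--     return newlist
-- ===== SOURCE B (Python) =====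
-- def sortLabels(labels):
--     # One pass distributes each label into its bucket (0 = single-split labels,
--     # 1..72 = (split-count n, dash-count d) cells in A's visiting order);
--     # labels with split-count >= 10 or dash-count >= 9 are dropped, as in A.
--     buckets = [[] for _ in range(73)]
--     for label in labels:
--         n = len(label.split(", '"))
--         if n == 1:
--             b = 0
--         else:
--             d = label.count("-")
--             if 2 <= n <= 9 and d <= 8:
--                 b = (9 - n) * 9 + d + 1
--             else:
--                 continue
--         buckets[b].append(label)
--     out = []
--     for bl in buckets:
--         out.extend(sorted(bl))
--     return out
-- ===== Notes on version B (the rewrite author's own statement) =====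
-- stated objective: faster
-- what changed: B replaces A's 73 separate scans of the input (one filter pass per (split-count, dash-count) cell) by a single pass that distributes each label into one of 73 buckets, then sorts each bucket and concatenates.
import Mathlib
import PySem

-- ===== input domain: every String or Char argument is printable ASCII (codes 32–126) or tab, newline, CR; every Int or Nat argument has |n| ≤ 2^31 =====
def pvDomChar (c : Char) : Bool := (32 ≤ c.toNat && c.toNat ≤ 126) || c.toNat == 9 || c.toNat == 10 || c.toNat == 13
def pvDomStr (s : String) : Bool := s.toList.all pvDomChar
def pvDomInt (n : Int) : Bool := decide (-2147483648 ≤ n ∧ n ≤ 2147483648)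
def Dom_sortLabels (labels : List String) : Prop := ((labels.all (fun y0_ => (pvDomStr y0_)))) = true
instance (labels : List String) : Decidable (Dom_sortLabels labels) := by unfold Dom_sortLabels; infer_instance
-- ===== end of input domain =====

-- B replaces A's 73 filter passes over the input by a single bucket-distributing pass (objective: faster, constant factor).

-- ===== PORT A =====
-- len(label.split(", '"))  (split never raises: the separator is non-empty)
def pvSplitLen (label : String) : Nat := ((PySem.Str.split? label ", '").getD []).length
-- label.count("-")
def pvDash (label : String) : Nat := PySem.Str.count label "-"
-- sublist.sort() / sorted(bl): Python string sort = code-point lexicographic on the character lists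
def pvSortS (xs : List String) : List String := PySem.List.sorted xs (fun x => x.toList) false

def sortLabels (labels : List String) : List String :=
  let sublist := labels.foldl (fun acc label =>
      if pvSplitLen label = 1 then acc ++ [label] else acc) []
  let newlist := ([] : List String) ++ pvSortS sublist
  (PySem.List.pyRange 9 1 (-1)).foldl (fun nl n =>
    (PySem.List.pyRange 0 9 1).foldl (fun nl2 dels =>
      let sub := labels.foldl (fun acc label =>
        if ((pvSplitLen label : Int) = n ∧ (pvDash label : Int) = dels)
        then acc ++ [label] else acc) []
      nl2 ++ pvSortS sub) nl) newlist

-- ===== PORT B =====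
def pvBucket (label : String) : Option Nat :=
  let n := pvSplitLen label
  if n = 1 then some 0
  else if 2 ≤ n ∧ n ≤ 9 ∧ pvDash label ≤ 8 then some ((9 - n) * 9 + pvDash label + 1)
  else none

-- loop body: drop the label (continue) or append it to its bucket
def pvStep (bs : List (List String)) (label : String) : List (List String) :=
  match pvBucket label with
  | none => bs
  | some b => bs.set b (bs.getD b [] ++ [label])

def sortLabels_alt (labels : List String) : List String :=
  let buckets := (List.range 73).map (fun _ => ([] : List String))
  let buckets := labels.foldl pvStep buckets
  buckets.foldl (fun out bl => out ++ pvSortS bl) []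

-- ===== PRECONDITION & SPEC =====
def Spec_sortLabels (labels : List String) (out : List String) : Prop := out = sortLabels_alt labels
instance (labels : List String) (out : List String) : Decidable (Spec_sortLabels labels out) := by unfold Spec_sortLabels; infer_instance

-- ===== CLAIM (what is proved, stated in full; the proofs are below) =====
def Claim_equal_sortLabels : Prop := ∀ (labels : List String), Dom_sortLabels labels → Spec_sortLabels labels (sortLabels labels)

-- ===== LEMMAS AND PROOFS =====

-- the canonical form both programs are reduced to
def pvChunk (labels : List String) (b : Nat) : List String :=
  pvSortS (labels.filter (fun l => pvBucket l == some b))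

theorem pv_foldl_filter_prop {α : Type} (p : α → Prop) [DecidablePred p] (l : List α) (acc : List α) :
    l.foldl (fun acc x => if p x then acc ++ [x] else acc) acc
      = acc ++ l.filter (fun x => decide (p x)) := by
  have h := PySem.List.foldl_append_if (fun x => decide (p x)) id l acc
  simpa using h

theorem pv_flatMap_congr {α β : Type} {l : List α} {f g : α → List β}
    (h : ∀ a ∈ l, f a = g a) : l.flatMap f = l.flatMap g := by
  simp only [List.flatMap]
  exact congrArg List.flatten (List.map_congr_left h)

theorem pv_bucket_zero (l : String) :
    (decide (pvSplitLen l = 1)) = (pvBucket l == some 0) := by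
  rw [Bool.eq_iff_iff]
  simp only [decide_eq_true_eq, beq_iff_eq, pvBucket]
  split_ifs with h1 h2 <;> simp <;> omega

theorem pv_bucket_nd (l : String) (n d : Int)
    (hn2 : 2 ≤ n) (hn9 : n ≤ 9) (hd0 : 0 ≤ d) (hd8 : d ≤ 8) :
    (decide ((pvSplitLen l : Int) = n ∧ (pvDash l : Int) = d))
      = (pvBucket l == some ((9 - n).toNat * 9 + d.toNat + 1)) := by
  rw [Bool.eq_iff_iff]
  simp only [decide_eq_true_eq, beq_iff_eq, pvBucket]
  split_ifs with h1 h2 <;> simp <;> omega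

theorem pv_A_canon (labels : List String) :
    sortLabels labels = (List.range 73).flatMap (pvChunk labels) := by
  unfold sortLabels
  simp only [PySem.List.foldl_append_eq_flatMap]
  rw [pv_foldl_filter_prop (fun label => pvSplitLen label = 1)]
  have hrange9 : PySem.List.pyRange 9 1 (-1) = [9,8,7,6,5,4,3,2] := by decide
  have hrange0 : PySem.List.pyRange 0 9 1 = [0,1,2,3,4,5,6,7,8] := by decide
  have hmid : (PySem.List.pyRange 9 1 (-1)).flatMap (fun n =>
      (PySem.List.pyRange 0 9 1).flatMap (fun dels =>
        pvSortS (labels.foldl (fun acc label =>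
          if ((pvSplitLen label : Int) = n ∧ (pvDash label : Int) = dels)
          then acc ++ [label] else acc) [])))
      = ((PySem.List.pyRange 9 1 (-1)).flatMap (fun n =>
          (PySem.List.pyRange 0 9 1).map (fun d => (9 - n).toNat * 9 + d.toNat + 1))).flatMap
          (pvChunk labels) := by
    rw [List.flatMap_assoc]
    refine pv_flatMap_congr ?_
    intro n hn
    rw [List.flatMap_map]
    refine pv_flatMap_congr ?_
    intro d hd
    rw [hrange9] at hn
    rw [hrange0] at hd
    simp only [List.mem_cons, List.not_mem_nil, or_false] at hn hd
    rw [pv_foldl_filter_prop (fun label => (pvSplitLen label : Int) = n ∧ (pvDash label : Int) = d)]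
    unfold pvChunk
    congr 2
    refine List.filter_congr ?_
    intro x _
    exact pv_bucket_nd x n d (by omega) (by omega) (by omega) (by omega)
  rw [hmid]
  have hids : List.range 73
      = 0 :: ((PySem.List.pyRange 9 1 (-1)).flatMap (fun n =>
          (PySem.List.pyRange 0 9 1).map (fun d => (9 - n).toNat * 9 + d.toNat + 1))) := by decide
  rw [hids, List.flatMap_cons]
  have h0 : labels.filter (fun x => decide (pvSplitLen x = 1))
      = labels.filter (fun l => pvBucket l == some 0) := by
    refine List.filter_congr ?_
    intro x _
    exact pv_bucket_zero x
  simp [h0, pvChunk]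

theorem pv_step_length (bs : List (List String)) (l : String) :
    (pvStep bs l).length = bs.length := by
  unfold pvStep
  cases pvBucket l <;> simp

theorem pv_fold_length (xs : List String) (bs : List (List String)) :
    (xs.foldl pvStep bs).length = bs.length := by
  induction xs generalizing bs with
  | nil => rfl
  | cons x xs ih => rw [List.foldl_cons, ih, pv_step_length]

theorem pv_bucket_lt (l : String) (b : Nat) (h : pvBucket l = some b) : b < 73 := by
  simp only [pvBucket] at h
  split_ifs at h with h1 h2 <;> simp at h <;> omega

theorem pv_fold_getD (xs : List String) (bs : List (List String)) (hlen : bs.length = 73)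
    (b : Nat) (hb : b < 73) :
    (xs.foldl pvStep bs).getD b []
      = bs.getD b [] ++ xs.filter (fun l => pvBucket l == some b) := by
  induction xs generalizing bs with
  | nil => simp
  | cons x xs ih =>
    rw [List.foldl_cons, ih (pvStep bs x) (by rw [pv_step_length]; exact hlen)]
    unfold pvStep
    cases h : pvBucket x with
    | none => simp [h]
    | some b' =>
      have hb' : b' < 73 := pv_bucket_lt x b' h
      by_cases hbb : b' = b
      · subst hbb
        simp only [List.getD_eq_getElem?_getD, List.getElem?_set, hlen, hb',
          if_pos, List.filter_cons, h, beq_self_eq_true, Option.getD_some]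
        simp [List.append_assoc]
      · simp only [List.getD_eq_getElem?_getD, List.getElem?_set, if_neg hbb, List.filter_cons, h]
        have : (some b' == some b) = false := by simp [hbb]
        simp [this]

theorem pv_B_canon (labels : List String) :
    sortLabels_alt labels = (List.range 73).flatMap (pvChunk labels) := by
  unfold sortLabels_alt
  rw [PySem.List.foldl_append_eq_flatMap pvSortS, List.nil_append]
  have hinit : ((List.range 73).map (fun _ => ([] : List String))).length = 73 := by simp
  have hbuckets : labels.foldl pvStep ((List.range 73).map (fun _ => ([] : List String)))
      = (List.range 73).map (fun b => labels.filter (fun l => pvBucket l == some b)) := by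
    apply List.ext_getElem
    · rw [pv_fold_length]; simp
    · intro i h1 h2
      have hi : i < 73 := by
        rw [pv_fold_length] at h1; simpa using h1
      have hA := pv_fold_getD labels ((List.range 73).map (fun _ => ([] : List String))) hinit i hi
      rw [List.getD_eq_getElem _ _ h1] at hA
      have hg : ((List.range 73).map (fun _ => ([] : List String))).getD i [] = [] := by
        have hconst : (List.range 73).map (fun _ => ([] : List String)) = List.replicate 73 [] := by
          simp
        rw [hconst, List.getD_eq_getElem?_getD, List.getElem?_replicate]
        simp [hi]
      rw [hA, hg]
      simp
  rw [hbuckets, List.flatMap_map]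
  rfl

-- ===== VERDICT (by name: the statement is the Claim_ definition above) =====
theorem sortLabels_spec : Claim_equal_sortLabels := by
  intro labels _
  unfold Spec_sortLabels
  rw [pv_A_canon, pv_B_canon]
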